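-- pv_equiv track=rewrite | github.com/SWeszler/google-kickstart | 2021_A/A3/a3.py | solution_set1
-- ===== SOURCE A (Python) =====
-- def solution_set1(N, K, M):
--     D = []
--
--     for i in range(1, len(M)):
--         d = M[i] - M[i - 1]
--         D.append(d)
--
--     D.sort(reverse=True)
--     D[0] =  -(-D[0] // 2)
--
--     return max(D)
-- ===== SOURCE B (Python) =====
-- def solution_set1(N, K, M):
--     m1 = M[1] - M[0]          # first gap (IndexError when len(M) < 2, as in A)
--     m2 = None                 # second-largest gap seen so far (None = not yet any)
--     for i in range(2, len(M)):
--         d = M[i] - M[i - 1]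
--         if d > m1:
--             m2 = m1
--             m1 = d
--         elif m2 is None or d > m2:
--             m2 = d
--     half = -(-m1 // 2)
--     if m2 is None:
--         return half
--     return max(half, m2)
-- ===== Notes on version B (the rewrite author's own statement) =====
-- stated objective: faster
-- what changed: Replaces A's build-list-then-full-sort with a single pass that tracks the largest and second-largest consecutive gap in two variables, returning max(ceil(largest/2), second-largest).
import Mathlib
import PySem

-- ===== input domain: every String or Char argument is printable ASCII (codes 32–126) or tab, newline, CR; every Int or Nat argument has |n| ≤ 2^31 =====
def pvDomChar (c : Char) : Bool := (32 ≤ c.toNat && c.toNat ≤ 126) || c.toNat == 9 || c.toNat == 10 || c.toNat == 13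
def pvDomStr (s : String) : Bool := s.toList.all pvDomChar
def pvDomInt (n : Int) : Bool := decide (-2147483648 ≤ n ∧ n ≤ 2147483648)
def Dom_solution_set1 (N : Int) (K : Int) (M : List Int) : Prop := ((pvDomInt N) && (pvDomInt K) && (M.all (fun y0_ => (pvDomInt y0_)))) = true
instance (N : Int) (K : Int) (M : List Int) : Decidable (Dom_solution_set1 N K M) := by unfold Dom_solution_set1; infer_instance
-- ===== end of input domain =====

-- B replaces A's build-then-sort of the gap list by a single-pass scan keeping the
-- largest and second-largest gap in two variables (O(n) instead of O(n log n)).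

-- ===== PORT A =====
-- A: build the gap list D, sort it descending, replace its head by its ceiling-half, return max(D).
def solution_set1 (N : Int) (K : Int) (M : List Int) : Int :=
  let D := (PySem.List.pyRange 1 (M.length : Int) 1).foldl
    (fun acc i => acc ++ [PySem.List.pyGetD M i 0 - PySem.List.pyGetD M (i - 1) 0]) []
  let Ds := PySem.List.sorted D (fun x => x) true
  let Ds' := PySem.List.pySetD Ds 0 (-(PySem.Int.floordiv (-(PySem.List.pyGetD Ds 0 0)) 2))
  (PySem.List.max? Ds' (fun x => x)).getD 0

-- ===== PORT B =====
-- B's loop body: update the (largest, second-largest-so-far) pair with gap d.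
def pvTop2Step (p : Int × Option Int) (d : Int) : Int × Option Int :=
  if p.1 < d then (d, some p.1)
  else
    match p.2 with
    | none => (p.1, some d)
    | some m2 => if m2 < d then (p.1, some d) else p

def solution_set1_alt (N : Int) (K : Int) (M : List Int) : Int :=
  let m1 := PySem.List.pyGetD M 1 0 - PySem.List.pyGetD M 0 0
  let st := (PySem.List.pyRange 2 (M.length : Int) 1).foldl
    (fun p i => pvTop2Step p (PySem.List.pyGetD M i 0 - PySem.List.pyGetD M (i - 1) 0))
    (m1, none)
  let half := -(PySem.Int.floordiv (-st.1) 2)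
  match st.2 with
  | none => half
  | some m2 => max half m2

-- ===== PRECONDITION & SPEC =====
-- Pre_ excludes lists with fewer than two elements: there are no gaps, and both A
-- (D[0] on the empty gap list) and B (M[1]) raise IndexError.
def Pre_solution_set1 (N : Int) (K : Int) (M : List Int) : Prop := 2 ≤ M.length
instance (N : Int) (K : Int) (M : List Int) : Decidable (Pre_solution_set1 N K M) := by
  unfold Pre_solution_set1; infer_instance
def pvWitness_solution_set1 : Int × Int × List Int := (3, 1, [1, 5, 6])
def Spec_solution_set1 (N : Int) (K : Int) (M : List Int) (out : Int) : Prop := out = solution_set1_alt N K M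
instance (N : Int) (K : Int) (M : List Int) (out : Int) : Decidable (Spec_solution_set1 N K M out) := by unfold Spec_solution_set1; infer_instance

-- ===== CLAIM (what is proved, stated in full; the proofs are below) =====
def Claim_equal_solution_set1 : Prop := ∀ (N : Int) (K : Int) (M : List Int), Dom_solution_set1 N K M → Pre_solution_set1 N K M → Spec_solution_set1 N K M (solution_set1 N K M)

-- ===== LEMMAS AND PROOFS =====

theorem pvTop2Step_none (c d : Int) :
    pvTop2Step (c, none) d = if c < d then (d, some c) else (c, some d) := rfl

theorem pvTop2Step_some (c m d : Int) :
    pvTop2Step (c, some m) d =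
      if c < d then (d, some c) else if m < d then (c, some d) else (c, some m) := rfl

-- Lift pvTop2Step to an optional state so the whole gap list is consumed by one fold.
def pvStep' (s : Option (Int × Option Int)) (d : Int) : Option (Int × Option Int) :=
  match s with
  | none => some (d, none)
  | some p => some (pvTop2Step p d)

theorem pvStep'_comm (s : Option (Int × Option Int)) (d e : Int) :
    pvStep' (pvStep' s d) e = pvStep' (pvStep' s e) d := by
  rcases s with _ | ⟨c, _ | m⟩ <;>
    simp only [pvStep', pvTop2Step_none, pvTop2Step_some] <;>
    (try split_ifs) <;>
    (try simp only [pvTop2Step_some]) <;>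
    (try split_ifs) <;>
    (try simp_all only [Option.some.injEq, Prod.mk.injEq, true_and]) <;>
    first | rfl | omega

theorem pvFoldl_step'_some (l : List Int) (p : Int × Option Int) :
    l.foldl pvStep' (some p) = some (l.foldl pvTop2Step p) := by
  induction l generalizing p with
  | nil => rfl
  | cons d t ih => simp [List.foldl_cons, pvStep', ih]

theorem pvFoldl_step'_perm (l₁ l₂ : List Int) (h : l₁.Perm l₂)
    (s : Option (Int × Option Int)) : l₁.foldl pvStep' s = l₂.foldl pvStep' s := by
  haveI : RightCommutative pvStep' := ⟨fun s d e => pvStep'_comm s d e⟩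
  exact h.foldl_eq s

-- Folding the step over a list whose elements are all ≤ the stored second maximum leaves the state fixed.
theorem pvFoldl_step_fixed (t : List Int) (c m : Int) (hm : m ≤ c)
    (ht : ∀ d ∈ t, d ≤ m) : t.foldl pvTop2Step (c, some m) = (c, some m) := by
  induction t with
  | nil => rfl
  | cons d t ih =>
      have hd : d ≤ m := ht d (by simp)
      have hstep : pvTop2Step (c, some m) d = (c, some m) := by
        rw [pvTop2Step_some]; split_ifs <;> first | rfl | omega
      rw [List.foldl_cons, hstep, ih (fun x hx => ht x (by simp [hx]))]

theorem pvFoldl_max_fixed (t : List Int) (a m : Int) (hm : m ≤ a)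
    (ht : ∀ d ∈ t, d ≤ m) : t.foldl max a = a := by
  induction t generalizing a with
  | nil => rfl
  | cons d t ih =>
      have hda : max a d = a := by have := ht d (by simp); omega
      rw [List.foldl_cons, hda, ih a hm (fun x hx => ht x (by simp [hx]))]

-- The gap at index i of M.
def pvGap (M : List Int) (i : Int) : Int :=
  PySem.List.pyGetD M i 0 - PySem.List.pyGetD M (i - 1) 0

theorem solution_set1_spec_aux (N K : Int) (M : List Int) (hM : 2 ≤ M.length) :
    solution_set1 N K M = solution_set1_alt N K M := by
  have hlen : (1 : Int) < (M.length : Int) := by exact_mod_cast hM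
  set L2 : List Int := (PySem.List.pyRange 2 (M.length : Int) 1).map (pvGap M) with hL2
  set G : List Int := (PySem.List.pyRange 1 (M.length : Int) 1).map (pvGap M) with hG
  have hGc : G = pvGap M 1 :: L2 := by
    rw [hG, PySem.List.pyRange_one_cons hlen, List.map_cons, hL2]
    norm_num
  -- A's gap list is G
  have hD : (PySem.List.pyRange 1 (M.length : Int) 1).foldl
      (fun acc i => acc ++ [PySem.List.pyGetD M i 0 - PySem.List.pyGetD M (i - 1) 0]) []
      = G := by
    simpa [pvGap] using
      PySem.List.foldl_append_singleton_eq_map (pvGap M) (PySem.List.pyRange 1 (M.length : Int) 1) []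
  -- B's fold over the range is the pvStep' fold over all of G
  have hm1 : PySem.List.pyGetD M 1 0 - PySem.List.pyGetD M 0 0 = pvGap M 1 := by
    rw [pvGap]; norm_num
  have hBfold : (PySem.List.pyRange 2 (M.length : Int) 1).foldl
      (fun p i => pvTop2Step p (PySem.List.pyGetD M i 0 - PySem.List.pyGetD M (i - 1) 0))
      (pvGap M 1, none)
      = L2.foldl pvTop2Step (pvGap M 1, none) := by
    rw [hL2, List.foldl_map]
    rfl
  have hGfold : G.foldl pvStep' none = some (L2.foldl pvTop2Step (pvGap M 1, none)) := by
    rw [hGc, List.foldl_cons]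
    exact pvFoldl_step'_some _ _
  -- the descending sorted gap list
  set s : List Int := PySem.List.sorted G (fun x => x) true with hs
  have hperm : s.Perm G := PySem.List.sorted_perm G (fun x => x) true
  obtain ⟨h, t, hst⟩ : ∃ h t, s = h :: t := by
    have hGlen : 1 ≤ G.length := by rw [hGc]; simp
    have hslen : 1 ≤ s.length := by rw [hperm.length_eq]; exact hGlen
    have hne : s ≠ [] := by intro hnil; rw [hnil] at hslen; simp at hslen
    obtain ⟨h, t, hst⟩ := List.exists_cons_of_ne_nil hne
    exact ⟨h, t, hst⟩
  have hpw : (h :: t).Pairwise (fun a b => b ≤ a) := by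
    rw [← hst, hs]; exact PySem.List.sorted_pairwise_rev G (fun x => x)
  simp only [solution_set1, solution_set1_alt]
  rw [hD, ← hs, hm1, hBfold, hst]
  cases t with
  | nil =>
      -- G and s are the same singleton, and B's loop is empty
      have hL2nil : L2 = [] := by
        have : G.length = 1 := by rw [← hperm.length_eq, hst]; rfl
        rw [hGc] at this
        simpa using List.length_eq_zero_iff.mp (by simpa using this)
      have hh : pvGap M 1 = h := by
        have := hperm
        rw [hst, hGc, hL2nil] at this
        simpa using this.symm
      rw [hL2nil, hh]
      simp [PySem.List.pySetD, PySem.List.pySet?, PySem.List.pyIdx?, PySem.List.pyGetD,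
        PySem.List.pyGet?, PySem.List.max?]
  | cons u t' =>
      have hu : u ≤ h := by
        simp only [List.pairwise_cons] at hpw
        exact hpw.1 u (by simp)
      have ht' : ∀ d ∈ t', d ≤ u := by
        simp only [List.pairwise_cons] at hpw
        exact fun d hd => hpw.2.1 d hd
      -- B's state is (h, some u)
      have hstate : L2.foldl pvTop2Step (pvGap M 1, none) = (h, some u) := by
        have hsf : s.foldl pvStep' none = some (h, some u) := by
          rw [hst, List.foldl_cons]
          have h1 : pvStep' none h = some (h, none) := rfl
          have h2 : pvTop2Step (h, none) u = (h, some u) := by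
            rw [pvTop2Step_none]; split_ifs <;> first | rfl | omega
          rw [h1, pvFoldl_step'_some, List.foldl_cons, h2,
            pvFoldl_step_fixed t' h u hu ht']
        have := (pvFoldl_step'_perm s G hperm none).symm
        rw [hGfold, hsf] at this
        exact Option.some.inj this
      rw [hstate]
      have hget : PySem.List.pyGetD (h :: u :: t') 0 0 = h := by
        simp [pysem]
      have hset : PySem.List.pySetD (h :: u :: t') 0
          (-(PySem.Int.floordiv (-h) 2)) = -(PySem.Int.floordiv (-h) 2) :: u :: t' := by
        simp [pysem]
      rw [hget, hset, PySem.List.max?_id_cons]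
      have hfm : (u :: t').foldl max (-(PySem.Int.floordiv (-h) 2))
          = max (-(PySem.Int.floordiv (-h) 2)) u := by
        rw [List.foldl_cons]
        exact pvFoldl_max_fixed t' _ u (le_max_right _ _) ht'
      rw [hfm]
      rfl

-- ===== VERDICT (by name: the statement is the Claim_ definition above) =====
theorem solution_set1_spec : Claim_equal_solution_set1 := by
  intro N K M _ hpre
  unfold Spec_solution_set1
  exact solution_set1_spec_aux N K M hpre
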